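-- pv_equiv track=rewrite | github.com/CarlOwOs/parrandatathon2025 | elias/interesting_pages_language_and_privacy.py | is_interesting
-- ===== SOURCE A (Python) =====
-- def is_interesting(key):
--     language_codes = [
--         #'en',  # English
--         'es',  # Spanish
--         'fr',  # French
--         'de',  # German
--         'it',  # Italian
--         'nl',  # Dutch
--         'pl',  # Polish
--         'pt',  # Portuguese
--         'ro',  # Romanian
--         'ru',  # Russian
--         'tr',  # Turkish
--         'zh',  # Chinese
--         'ja',  # Japanese
--         'ko',  # Korean
--         'ar',  # Arabic
--         'sv',  # Swedish
--         'no',  # Norwegian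
--         'da',  # Danish
--         'fi',  # Finnish
--         'cs',  # Czech
--         'sk',  # Slovak
--         'hu',  # Hungarian
--         'el',  # Greek
--         'bg',  # Bulgarian
--         'uk',  # Ukrainian
--         'he',  # Hebrew
--         'hi',  # Hindi
--         'id',  # Indonesian
--         'ms',  # Malay
--         'th',  # Thai
--         'vi',  # Vietnamese
--         'sr',  # Serbian
--         'hr',  # Croatian
--         'lt',  # Lithuanian
--         'lv',  # Latvian
--         'sl',  # Slovenian
--         'et',  # Estonian
--     ]
--     shitty_pages = [
--         "privacy-policy",
--         "terms-of-use",
--         "terms-conditions",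
--         "terms-and-privacy",
--         "privacy-statement",
--         "cookie-policy",
--         "terms-of-service",
--         "legal",
--         "disclaimer",
--         "gdpr-compliance",
--         "data-protection",
--         "cookies",
--         "acceptable-use-policy",
--         "user-agreement",
--         "eula",  # End User License Agreement
--         "dmca",
--         "code-of-conduct",
--         "responsible-disclosure",
--         "site-map",
--         "copyright",
--         "accessibility",
--         "trust-and-safety",
--         "community-guidelines",
--         "legal-notice",
--     ]
--     non_english = any("/"+language_code+"/" in key.lower() for language_code in language_codes)
--     privacy_etc = any("/"+keyword in key.lower() for keyword in shitty_pages)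
--     return "No" if non_english or privacy_etc else "Yes"
-- ===== SOURCE B (Python) =====
-- # Split-based rewrite: instead of running a substring search per pattern, split
-- # the lowered key on the slash character once; a language code must equal an interior segment
-- # and a legal keyword must be a prefix of a segment that follows a slash.
-- _LANG_SET = frozenset(
--     "es fr de it nl pl pt ro ru tr zh ja ko ar sv no da fi cs sk hu el bg uk "
--     "he hi id ms th vi sr hr lt lv sl et".split())
-- _KW_TUPLE = tuple(
--     "privacy-policy terms-of-use terms-conditions terms-and-privacy "
--     "privacy-statement cookie-policy terms-of-service legal disclaimer "
--     "gdpr-compliance data-protection cookies acceptable-use-policy "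
--     "user-agreement eula dmca code-of-conduct responsible-disclosure "
--     "site-map copyright accessibility trust-and-safety community-guidelines "
--     "legal-notice".split())
--
-- def is_interesting(key):
--     parts = key.lower().split('/')
--     if any(p in _LANG_SET for p in parts[1:-1]):
--         return "No"
--     if any(p.startswith(_KW_TUPLE) for p in parts[1:]):
--         return "No"
--     return "Yes"
-- ===== Notes on version B (the rewrite author's own statement) =====
-- stated objective: faster
-- what changed: Instead of running a separate full substring search for each of the 60 patterns, B splits the lowered key on the slash character once and then tests segments directly: a language code must equal an interior segment, a legal keyword must be a prefix of a segment that follows a slash (set membership / bundled startswith).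
import Mathlib
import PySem

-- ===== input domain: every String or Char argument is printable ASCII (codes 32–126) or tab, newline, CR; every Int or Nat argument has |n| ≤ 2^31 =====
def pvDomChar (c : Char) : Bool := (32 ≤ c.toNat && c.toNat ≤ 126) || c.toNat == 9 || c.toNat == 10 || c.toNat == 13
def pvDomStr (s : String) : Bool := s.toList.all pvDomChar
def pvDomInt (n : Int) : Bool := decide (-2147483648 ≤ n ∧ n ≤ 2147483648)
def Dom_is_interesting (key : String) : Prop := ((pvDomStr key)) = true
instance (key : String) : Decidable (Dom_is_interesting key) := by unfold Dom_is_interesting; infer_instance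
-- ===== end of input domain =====

-- B splits the lowered key on the slash character once and tests segments (equality for language codes, prefix for legal keywords) instead of one substring search per pattern; objective: faster (measured).

-- ===== PORT A =====
def pvLanguageCodes : List String :=
  ["es", "fr", "de", "it", "nl", "pl", "pt", "ro", "ru", "tr", "zh", "ja",
   "ko", "ar", "sv", "no", "da", "fi", "cs", "sk", "hu", "el", "bg", "uk",
   "he", "hi", "id", "ms", "th", "vi", "sr", "hr", "lt", "lv", "sl", "et"]

def pvShittyPages : List String :=
  ["privacy-policy", "terms-of-use", "terms-conditions", "terms-and-privacy",
   "privacy-statement", "cookie-policy", "terms-of-service", "legal",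
   "disclaimer", "gdpr-compliance", "data-protection", "cookies",
   "acceptable-use-policy", "user-agreement", "eula", "dmca",
   "code-of-conduct", "responsible-disclosure", "site-map", "copyright",
   "accessibility", "trust-and-safety", "community-guidelines", "legal-notice"]

def is_interesting (key : String) : String :=
  let nonEnglish := pvLanguageCodes.any (fun code => PySem.Str.isIn ("/" ++ code ++ "/") (PySem.Str.lower key))
  let privacyEtc := pvShittyPages.any (fun kw => PySem.Str.isIn ("/" ++ kw) (PySem.Str.lower key))
  if nonEnglish || privacyEtc then "No" else "Yes"

-- ===== PORT B =====
-- Python's str.split(sep) on a character list (Source B uses it for ' ' and '/')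
def pvSplit (sep : Char) : List Char → List (List Char)
  | [] => [[]]
  | c :: rest =>
    let ps := pvSplit sep rest
    if c = sep then [] :: ps else (c :: ps.headI) :: ps.tail

-- Source B builds its two pattern collections by splitting one space-separated literal
def pvLangSet : List (List Char) :=
  pvSplit ' ' ("es fr de it nl pl pt ro ru tr zh ja ko ar sv no da fi cs sk hu el bg uk " ++
    "he hi id ms th vi sr hr lt lv sl et").toList

def pvKwTuple : List (List Char) :=
  pvSplit ' ' ("privacy-policy terms-of-use terms-conditions terms-and-privacy " ++
    "privacy-statement cookie-policy terms-of-service legal disclaimer " ++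
    "gdpr-compliance data-protection cookies acceptable-use-policy " ++
    "user-agreement eula dmca code-of-conduct responsible-disclosure " ++
    "site-map copyright accessibility trust-and-safety community-guidelines " ++
    "legal-notice").toList

def is_interesting_alt (key : String) : String :=
  let parts := pvSplit '/' (PySem.Str.lower key).toList
  if (parts.tail.dropLast).any (fun p => pvLangSet.contains p) then "No"
  else if parts.tail.any (fun p => pvKwTuple.any (fun kw => kw.isPrefixOf p)) then "No"
  else "Yes"

-- ===== PRECONDITION & SPEC =====
def Spec_is_interesting (key : String) (out : String) : Prop := out = is_interesting_alt key
instance (key : String) (out : String) : Decidable (Spec_is_interesting key out) := by unfold Spec_is_interesting; infer_instance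

-- ===== CLAIM (what is proved, stated in full; the proofs are below) =====
def Claim_equal_is_interesting : Prop := ∀ (key : String), Dom_is_interesting key → Spec_is_interesting key (is_interesting key)

-- ===== LEMMAS AND PROOFS =====

lemma pvSplit_ne_nil (sep : Char) (s : List Char) : pvSplit sep s ≠ [] := by
  cases s with
  | nil => simp [pvSplit]
  | cons c rest => simp only [pvSplit]; split <;> simp

lemma pvSplit_cons (sep c : Char) (rest : List Char) :
    pvSplit sep (c :: rest) =
      if c = sep then [] :: pvSplit sep rest
      else (c :: (pvSplit sep rest).headI) :: (pvSplit sep rest).tail := rfl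

-- a slashless word is a prefix of s iff it is a prefix of the first segment
lemma pvPrefix_head (s : List Char) :
    ∀ w : List Char, '/' ∉ w → (w <+: s ↔ w <+: (pvSplit '/' s).headI) := by
  induction s with
  | nil => intro w hw; simp [pvSplit]
  | cons c rest ih =>
    intro w hw
    by_cases hc : c = '/'
    · subst hc
      rw [pvSplit_cons, if_pos rfl, List.headI_cons]
      cases w with
      | nil => simp
      | cons a w' =>
        constructor
        · intro h
          have ha := ((List.cons_prefix_cons).1 h).1
          exact absurd (show ('/' : Char) ∈ a :: w' by simp [ha]) hw
        · intro h; exact absurd h (by simp)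
    · rw [pvSplit_cons, if_neg hc, List.headI_cons]
      cases w with
      | nil => simp
      | cons a w' =>
        simp only [List.cons_prefix_cons]
        have := ih w' (fun h => hw (List.mem_cons_of_mem _ h))
        tauto

-- a slashless word followed by '/' is a prefix of s iff it IS the first segment and another follows
lemma pvPrefixSlash_head (s : List Char) :
    ∀ w : List Char, '/' ∉ w →
      ((w ++ ['/']) <+: s ↔ (pvSplit '/' s).headI = w ∧ 2 ≤ (pvSplit '/' s).length) := by
  induction s with
  | nil =>
    intro w hw
    simp [pvSplit]
  | cons c rest ih =>
    intro w hw
    have hne := pvSplit_ne_nil '/' rest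
    by_cases hc : c = '/'
    · subst hc
      rw [pvSplit_cons, if_pos rfl, List.headI_cons, List.length_cons]
      have hlen : 1 ≤ (pvSplit '/' rest).length := List.length_pos_of_ne_nil hne
      cases w with
      | nil => simp [List.cons_prefix_cons]; omega
      | cons a w' =>
        constructor
        · intro h
          have ha := ((List.cons_prefix_cons).1 h).1
          exact absurd (show ('/' : Char) ∈ a :: w' by simp [ha]) hw
        · rintro ⟨h, -⟩; exact absurd h (by simp)
    · rw [pvSplit_cons, if_neg hc, List.headI_cons, List.length_cons]
      have hlen : (pvSplit '/' rest).tail.length + 1 = (pvSplit '/' rest).length := by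
        cases h : pvSplit '/' rest with
        | nil => exact absurd h hne
        | cons a t => simp
      cases w with
      | nil =>
        simp only [List.nil_append]
        constructor
        · intro h
          have ha := ((List.cons_prefix_cons).1 h).1
          exact absurd ha.symm hc
        · rintro ⟨h, -⟩
          exact absurd h (List.cons_ne_nil _ _)
      | cons a w' =>
        simp only [List.cons_append, List.cons_prefix_cons]
        have := ih w' (fun h => hw (List.mem_cons_of_mem _ h))
        constructor
        · rintro ⟨ha, hp⟩
          rcases this.1 hp with ⟨hh, hl⟩
          exact ⟨by rw [ha, hh], by omega⟩
        · rintro ⟨hh, hl⟩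
          injection hh with h1 h2
          exact ⟨h1.symm, this.2 ⟨h2, by omega⟩⟩

-- '/'+w occurs in s iff w is a prefix of some segment after a slash
lemma pvInfix_tail (s : List Char) :
    ∀ w : List Char, '/' ∉ w →
      (('/' :: w) <:+: s ↔ ∃ p ∈ (pvSplit '/' s).tail, w <+: p) := by
  induction s with
  | nil => intro w hw; simp [pvSplit]
  | cons c rest ih =>
    intro w hw
    rw [List.infix_cons_iff]
    by_cases hc : c = '/'
    · subst hc
      rw [pvSplit_cons, if_pos rfl, List.tail_cons]
      cases h : pvSplit '/' rest with
      | nil => exact absurd h (pvSplit_ne_nil '/' rest)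
      | cons hd t =>
        have hhead : (pvSplit '/' rest).headI = hd := by rw [h]; rfl
        have htail : (pvSplit '/' rest).tail = t := by rw [h]; rfl
        constructor
        · rintro (hp | hi)
          · rcases (List.cons_prefix_cons).1 hp with ⟨-, hp'⟩
            exact ⟨hd, by simp, hhead ▸ (pvPrefix_head rest w hw).1 hp'⟩
          · rcases (ih w hw).1 hi with ⟨p, hp, hpre⟩
            exact ⟨p, by simp [htail ▸ hp], hpre⟩
        · rintro ⟨p, hp, hpre⟩
          rcases List.mem_cons.1 hp with rfl | hp'
          · exact Or.inl ((List.cons_prefix_cons).2 ⟨rfl, (pvPrefix_head rest w hw).2 (hhead ▸ hpre)⟩)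
          · exact Or.inr ((ih w hw).2 ⟨p, htail ▸ hp', hpre⟩)
    · rw [pvSplit_cons, if_neg hc, List.tail_cons]
      constructor
      · rintro (hp | hi)
        · have ha := ((List.cons_prefix_cons).1 hp).1
          exact absurd ha.symm hc
        · exact (ih w hw).1 hi
      · intro h; exact Or.inr ((ih w hw).2 h)

-- '/'+w+'/' occurs in s iff w equals an interior segment
lemma pvInfix_interior (s : List Char) :
    ∀ w : List Char, '/' ∉ w →
      (('/' :: (w ++ ['/'])) <:+: s ↔ w ∈ ((pvSplit '/' s).tail).dropLast) := by
  induction s with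
  | nil => intro w hw; simp [pvSplit]
  | cons c rest ih =>
    intro w hw
    rw [List.infix_cons_iff]
    by_cases hc : c = '/'
    · subst hc
      rw [pvSplit_cons, if_pos rfl, List.tail_cons]
      cases h : pvSplit '/' rest with
      | nil => exact absurd h (pvSplit_ne_nil '/' rest)
      | cons hd t =>
        have htail : (pvSplit '/' rest).tail = t := by rw [h]; rfl
        have hp4 := pvPrefixSlash_head rest w hw
        rw [h] at hp4
        simp only [List.headI_cons, List.length_cons] at hp4
        constructor
        · rintro (hp | hi)
          · rcases (List.cons_prefix_cons).1 hp with ⟨-, hp'⟩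
            rcases hp4.1 hp' with ⟨rfl, hl⟩
            cases t with
            | nil => simp at hl
            | cons a t' => simp [List.dropLast_cons₂]
          · have hmem := (ih w hw).1 hi
            rw [htail] at hmem
            cases t with
            | nil => simp at hmem
            | cons a t' =>
              rw [List.dropLast_cons₂, List.mem_cons]
              exact Or.inr hmem
        · intro hmem
          cases t with
          | nil => simp at hmem
          | cons a t' =>
            rw [List.dropLast_cons₂, List.mem_cons] at hmem
            rcases hmem with rfl | hmem'
            · exact Or.inl ((List.cons_prefix_cons).2 ⟨rfl, hp4.2 ⟨rfl, by simp⟩⟩)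
            · refine Or.inr ((ih w hw).2 ?_)
              rw [htail]
              exact hmem'
    · rw [pvSplit_cons, if_neg hc, List.tail_cons]
      constructor
      · rintro (hp | hi)
        · have ha := ((List.cons_prefix_cons).1 hp).1
          exact absurd ha.symm hc
        · exact (ih w hw).1 hi
      · intro h; exact Or.inr ((ih w hw).2 h)

set_option maxRecDepth 40000 in
lemma pvLangSet_eq : pvLangSet = pvLanguageCodes.map String.toList := by decide
set_option maxRecDepth 40000 in
lemma pvKwTuple_eq : pvKwTuple = pvShittyPages.map String.toList := by decide
lemma pvCodes_slashless : ∀ c ∈ pvLanguageCodes, '/' ∉ c.toList := by decide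
lemma pvKws_slashless : ∀ k ∈ pvShittyPages, '/' ∉ k.toList := by decide

lemma pvLangEquiv (low : String) :
    pvLanguageCodes.any (fun code => PySem.Str.isIn ("/" ++ code ++ "/") low) =
      (((pvSplit '/' low.toList).tail.dropLast).any (fun p => pvLangSet.contains p)) := by
  rw [Bool.eq_iff_iff]
  simp only [List.any_eq_true, PySem.Str.isIn_iff_infix, List.contains_iff_mem,
    pvLangSet_eq, List.mem_map]
  constructor
  · rintro ⟨code, hcmem, hinf⟩
    have h2 : ('/' :: (code.toList ++ ['/'])) <:+: low.toList := by
      simpa [String.toList_append] using hinf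
    exact ⟨code.toList, (pvInfix_interior _ _ (pvCodes_slashless code hcmem)).1 h2,
      ⟨code, hcmem, rfl⟩⟩
  · rintro ⟨p, hpmem, code, hcmem, rfl⟩
    refine ⟨code, hcmem, ?_⟩
    have h2 := (pvInfix_interior _ _ (pvCodes_slashless code hcmem)).2 hpmem
    simpa [String.toList_append] using h2

lemma pvKwEquiv (low : String) :
    pvShittyPages.any (fun kw => PySem.Str.isIn ("/" ++ kw) low) =
      ((pvSplit '/' low.toList).tail.any (fun p => pvKwTuple.any (fun kw => kw.isPrefixOf p))) := by
  rw [Bool.eq_iff_iff]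
  simp only [List.any_eq_true, PySem.Str.isIn_iff_infix, List.isPrefixOf_iff_prefix,
    pvKwTuple_eq, List.mem_map]
  constructor
  · rintro ⟨kw, hkmem, hinf⟩
    have h2 : ('/' :: kw.toList) <:+: low.toList := by
      simpa [String.toList_append] using hinf
    rcases (pvInfix_tail _ _ (pvKws_slashless kw hkmem)).1 h2 with ⟨p, hp, hpre⟩
    exact ⟨p, hp, kw.toList, ⟨kw, hkmem, rfl⟩, hpre⟩
  · rintro ⟨p, hp, w, ⟨kw, hkmem, rfl⟩, hpre⟩
    refine ⟨kw, hkmem, ?_⟩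
    have h2 := (pvInfix_tail _ _ (pvKws_slashless kw hkmem)).2 ⟨p, hp, hpre⟩
    simpa [String.toList_append] using h2

lemma pvIfShape (b1 b2 : Bool) :
    (if b1 || b2 then "No" else "Yes") =
      (if b1 then "No" else if b2 then "No" else "Yes") := by
  cases b1 <;> cases b2 <;> rfl

-- ===== VERDICT (by name: the statement is the Claim_ definition above) =====
theorem is_interesting_spec : Claim_equal_is_interesting := by
  intro key _
  unfold Spec_is_interesting is_interesting is_interesting_alt
  simp only [pvLangEquiv (PySem.Str.lower key), pvKwEquiv (PySem.Str.lower key)]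
  exact pvIfShape _ _
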